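-- pv_equiv track=rewrite | github.com/ntpz870817/Chamaeleo | methods/components/motif_validity.py | dyad_motif_repeat
-- ===== SOURCE A (Python) =====
-- def dyad_motif_repeat(dna_motif, max_repeat):
--     """
--     introduction: Compute the complementary repetition of fragments in a DNA motif.
--
--     :param dna_motif: DNA motif for detection.
--                        Type: string.
--
--     :param max_repeat: Maximum repetition times.
--                         More than that time, the DNA motif was considered unfriendly.
--
--     :return: Whether DNA motif conforms to the friendliness or not.
--     """
--     length = len(dna_motif) - 1
--     while length > max_repeat:
--         for index in range(len(dna_motif)):
--             if index + length < len(dna_motif):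
--                 sample = dna_motif[index: index + length]
--                 if dna_motif.count(sample[::-1]) > 0:
--                     return False
--         length -= 1
--
--     return True
-- ===== SOURCE B (Python) =====
-- def dyad_motif_repeat(dna_motif, max_repeat):
--     n = len(dna_motif)
--     if n == 0 or max_repeat >= n - 1:
--         return True
--     length = max_repeat + 1
--     if length <= 0:
--         return False
--     for index in range(n - length):
--         if dna_motif[index: index + length][::-1] in dna_motif:
--             return False
--     return True
-- ===== Notes on version B (the rewrite author's own statement) =====
-- stated objective: faster
-- what changed: Instead of scanning every fragment length from n-1 down to max_repeat+1 with a substring count at each position, B uses the monotonicity of reversed-fragment occurrence (a hit at length L implies a hit at length L-1) to test only the single smallest length max_repeat+1, with direct 'in' containment.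
import Mathlib
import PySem

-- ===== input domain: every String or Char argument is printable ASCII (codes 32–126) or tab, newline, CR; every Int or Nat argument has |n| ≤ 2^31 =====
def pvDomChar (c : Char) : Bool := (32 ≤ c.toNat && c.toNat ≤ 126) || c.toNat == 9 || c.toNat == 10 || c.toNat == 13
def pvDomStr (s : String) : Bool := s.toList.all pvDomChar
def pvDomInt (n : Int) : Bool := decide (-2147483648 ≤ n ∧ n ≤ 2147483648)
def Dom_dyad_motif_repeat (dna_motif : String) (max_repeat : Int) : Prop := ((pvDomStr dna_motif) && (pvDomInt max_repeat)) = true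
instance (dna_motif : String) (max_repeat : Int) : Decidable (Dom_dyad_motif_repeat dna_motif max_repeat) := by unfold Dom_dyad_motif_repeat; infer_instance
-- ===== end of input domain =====

-- B tests only the smallest fragment length max_repeat+1 (occurrence is monotone in length)
-- instead of A's scan over all lengths with a count at each position; measurably faster.


-- ===== PORT A =====
-- the body of A's 'for index in range(len(dna_motif))' loop (early return = List.any);
-- sample[::-1] is List.reverse (PySem.List.slice?_none_none_neg_one);
-- 'dna_motif.count(…) > 0' is PySem.Chars.count
def pvInnerA (s : List Char) (length : Int) : Bool :=
  (PySem.List.pyRange 0 (s.length : Int) 1).any (fun index =>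
    if index + length < (s.length : Int) then
      decide (0 < PySem.Chars.count s ((PySem.List.slice s (some index) (some (index + length))).reverse))
    else false)

-- the 'while length > max_repeat' loop; fuel = (length - max_repeat).toNat counts the
-- remaining iterations exactly (length drops by 1 each turn), so fuel 0 means the
-- while-condition is already false
def pvLoopA (s : List Char) (max_repeat : Int) : Nat → Int → Bool
  | 0, _ => true
  | fuel + 1, length =>
    if max_repeat < length then
      if pvInnerA s length then false
      else pvLoopA s max_repeat fuel (length - 1)
    else true

def dyad_motif_repeat (dna_motif : String) (max_repeat : Int) : Bool :=
  let s := dna_motif.toList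
  pvLoopA s max_repeat (((s.length : Int) - 1 - max_repeat).toNat) ((s.length : Int) - 1)

-- ===== PORT B =====
def dyad_motif_repeat_alt (dna_motif : String) (max_repeat : Int) : Bool :=
  let s := dna_motif.toList
  let n : Int := s.length
  if n = 0 ∨ n - 1 ≤ max_repeat then true
  else
    let length := max_repeat + 1
    if length ≤ 0 then false
    else if (PySem.List.pyRange 0 (n - length) 1).any (fun index =>
        PySem.Chars.isIn ((PySem.List.slice s (some index) (some (index + length))).reverse) s)
      then false else true

-- ===== PRECONDITION & SPEC =====
def Spec_dyad_motif_repeat (dna_motif : String) (max_repeat : Int) (out : Bool) : Prop := out = dyad_motif_repeat_alt dna_motif max_repeat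
instance (dna_motif : String) (max_repeat : Int) (out : Bool) : Decidable (Spec_dyad_motif_repeat dna_motif max_repeat out) := by unfold Spec_dyad_motif_repeat; infer_instance

-- ===== CLAIM (what is proved, stated in full; the proofs are below) =====
def Claim_equal_dyad_motif_repeat : Prop := ∀ (dna_motif : String) (max_repeat : Int), Dom_dyad_motif_repeat dna_motif max_repeat → Spec_dyad_motif_repeat dna_motif max_repeat (dyad_motif_repeat dna_motif max_repeat)

-- ===== LEMMAS AND PROOFS =====

theorem pv_go_le (sub : List Char) (fuel : Nat) (l : List Char) (acc : Nat) :
    acc ≤ PySem.Chars.count.go sub fuel l acc := by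
  induction fuel generalizing l acc with
  | zero => simp [PySem.Chars.count.go]
  | succ fuel ih =>
    cases l with
    | nil => simp [PySem.Chars.count.go]
    | cons h t =>
      simp only [PySem.Chars.count.go]
      split
      · exact le_trans (Nat.le_succ acc) (ih _ _)
      · exact ih _ _

theorem pv_go_pos_iff (sub : List Char) (hsub : sub ≠ []) (fuel : Nat) (l : List Char)
    (acc : Nat) (hfuel : l.length ≤ fuel) :
    acc < PySem.Chars.count.go sub fuel l acc ↔ sub <:+: l := by
  induction fuel generalizing l acc with
  | zero =>
    have : l = [] := List.eq_nil_of_length_eq_zero (Nat.le_zero.mp hfuel)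
    subst this
    simp [PySem.Chars.count.go, List.infix_nil, hsub]
  | succ fuel ih =>
    cases l with
    | nil => simp [PySem.Chars.count.go, List.infix_nil, hsub]
    | cons h t =>
      simp only [PySem.Chars.count.go]
      by_cases hp : sub.isPrefixOf (h :: t)
      · simp only [hp, if_true]
        constructor
        · intro _
          exact (List.isPrefixOf_iff_prefix.mp hp).isInfix
        · intro _
          exact lt_of_lt_of_le (Nat.lt_succ_self acc) (pv_go_le sub fuel _ (acc + 1))
      · simp only [hp, Bool.false_eq_true, if_false]
        have hfuel' : t.length ≤ fuel := by
          simpa using Nat.succ_le_succ_iff.mp hfuel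
        rw [ih t acc hfuel', List.infix_cons_iff]
        have : ¬ sub <+: (h :: t) := fun hc => hp (List.isPrefixOf_iff_prefix.mpr hc)
        tauto

theorem pv_count_pos_iff (s sub : List Char) :
    0 < PySem.Chars.count s sub ↔ sub <:+: s := by
  by_cases h : sub = []
  · subst h; simp [PySem.Chars.count, List.nil_infix]
  · have : sub.isEmpty = false := by simpa [List.isEmpty_iff] using h
    simp only [PySem.Chars.count, this, Bool.false_eq_true, if_false]
    exact pv_go_pos_iff sub h s.length s 0 le_rfl

theorem pv_innerA_iff (s : List Char) (L : Int) :
    pvInnerA s L = true ↔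
      ∃ i : Int, 0 ≤ i ∧ i < (s.length : Int) ∧ i + L < (s.length : Int) ∧
        (PySem.List.slice s (some i) (some (i + L))).reverse <:+: s := by
  unfold pvInnerA
  rw [List.any_eq_true]
  constructor
  · rintro ⟨i, hm, hp⟩
    have hmem := (PySem.List.mem_pyRange_one).mp hm
    by_cases hg : i + L < (s.length : Int)
    · refine ⟨i, hmem.1, hmem.2, hg, ?_⟩
      simp only [hg, if_true, decide_eq_true_iff] at hp
      exact (pv_count_pos_iff s _).mp hp
    · simp [hg] at hp
  · rintro ⟨i, h0, hin, hiL, hinf⟩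
    refine ⟨i, PySem.List.mem_pyRange_one.mpr ⟨h0, hin⟩, ?_⟩
    simp only [hiL, if_true, decide_eq_true_iff]
    exact (pv_count_pos_iff s _).mpr hinf

theorem pv_innerA_mono (s : List Char) (L : Int) (hL : 2 ≤ L)
    (h : pvInnerA s L = true) : pvInnerA s (L - 1) = true := by
  obtain ⟨i, h0, hin, hiL, hinf⟩ := (pv_innerA_iff s L).mp h
  refine (pv_innerA_iff s (L - 1)).mpr ⟨i, h0, hin, by omega, ?_⟩
  have h1 : (0:Int) ≤ i := h0
  have h2 : (0:Int) ≤ i + L := by omega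
  have h3 : (0:Int) ≤ i + (L - 1) := by omega
  rw [PySem.List.slice_toNat s h1 h3]
  rw [PySem.List.slice_toNat s h1 h2] at hinf
  have e1 : (i + (L - 1)).toNat - i.toNat = (L - 1).toNat := by omega
  have e2 : (i + L).toNat - i.toNat = L.toNat := by omega
  rw [e1]
  rw [e2] at hinf
  have htk : (s.drop i.toNat).take (L - 1).toNat
      = ((s.drop i.toNat).take L.toNat).take (L - 1).toNat := by
    rw [List.take_take, min_eq_left (by omega)]
  rw [htk]
  have hpre : ((s.drop i.toNat).take L.toNat).take (L - 1).toNat <+: (s.drop i.toNat).take L.toNat :=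
    List.take_prefix _ _
  have hsuf : (((s.drop i.toNat).take L.toNat).take (L - 1).toNat).reverse
      <:+ ((s.drop i.toNat).take L.toNat).reverse := List.reverse_suffix.mpr hpre
  exact hsuf.isInfix.trans hinf

theorem pv_innerA_descend (s : List Char) (d : Nat) (L : Int) (hL : 1 ≤ L)
    (h : pvInnerA s (L + d) = true) : pvInnerA s L = true := by
  induction d generalizing L with
  | zero => simpa using h
  | succ d ih =>
    have : pvInnerA s (L + d) = true := by
      have h2 : (2:Int) ≤ L + (d + 1) := by omega
      have := pv_innerA_mono s (L + (d + 1)) h2 (by exact_mod_cast h)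
      simpa [show (L : Int) + ((d : Int) + 1) - 1 = L + d by ring] using this
    exact ih L hL this

theorem pv_loopA_iff (s : List Char) (mr : Int) (fuel : Nat) (L : Int)
    (hmr : mr ≤ L) (hfuel : fuel = (L - mr).toNat) :
    pvLoopA s mr fuel L = true ↔ ∀ L', mr < L' → L' ≤ L → pvInnerA s L' = false := by
  induction fuel generalizing L with
  | zero =>
    have : L = mr := by omega
    subst this
    simp only [pvLoopA, true_iff]
    intro L' h1 h2; omega
  | succ fuel ih =>
    have hlt : mr < L := by omega
    simp only [pvLoopA, hlt, if_true]
    by_cases hin : pvInnerA s L = true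
    · simp only [hin, if_true, Bool.false_eq_true, false_iff]
      intro hall
      have := hall L hlt le_rfl
      simp [hin] at this
    · have hinf : pvInnerA s L = false := by simpa using hin
      simp only [hinf, Bool.false_eq_true, if_false]
      rw [ih (L - 1) (by omega) (by omega)]
      constructor
      · intro hall L' h1 h2
        by_cases hle : L' ≤ L - 1
        · exact hall L' h1 hle
        · have : L' = L := by omega
          subst this; exact hinf
      · intro hall L' h1 h2
        exact hall L' h1 (by omega)

theorem pv_innerA_zero (s : List Char) (hn : 1 ≤ (s.length : Int)) :
    pvInnerA s 0 = true := by
  refine (pv_innerA_iff s 0).mpr ⟨0, le_rfl, by omega, by omega, ?_⟩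
  have : PySem.List.slice s (some (0:Int)) (some ((0:Int) + 0)) = [] := by
    rw [PySem.List.slice_toNat s (by omega) (by omega)]
    simp
  rw [this]
  simp [List.nil_infix]

-- B's single-length check coincides with A's inner loop at length max_repeat+1 (≥ 1)
theorem pv_alt_any_iff (s : List Char) (L : Int) (hL : 1 ≤ L) :
    ((PySem.List.pyRange 0 ((s.length : Int) - L) 1).any (fun index =>
        PySem.Chars.isIn ((PySem.List.slice s (some index) (some (index + L))).reverse) s) = true)
      ↔ pvInnerA s L = true := by
  rw [List.any_eq_true, pv_innerA_iff]
  constructor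
  · rintro ⟨i, hm, hp⟩
    have hmem := PySem.List.mem_pyRange_one.mp hm
    exact ⟨i, hmem.1, by omega, by omega, (PySem.Chars.isIn_iff_infix _ _).mp hp⟩
  · rintro ⟨i, h0, hin, hiL, hinf⟩
    exact ⟨i, PySem.List.mem_pyRange_one.mpr ⟨h0, by omega⟩,
      (PySem.Chars.isIn_iff_infix _ _).mpr hinf⟩

-- the two port bodies agree, over the underlying character list
theorem pv_main (s : List Char) (mr : Int) :
    pvLoopA s mr (((s.length : Int) - 1 - mr).toNat) ((s.length : Int) - 1)
      = (if (s.length : Int) = 0 ∨ (s.length : Int) - 1 ≤ mr then true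
         else if mr + 1 ≤ 0 then false
         else if (PySem.List.pyRange 0 ((s.length : Int) - (mr + 1)) 1).any (fun index =>
             PySem.Chars.isIn ((PySem.List.slice s (some index) (some (index + (mr + 1)))).reverse) s)
           then false else true) := by
  by_cases hbig : (s.length : Int) = 0 ∨ (s.length : Int) - 1 ≤ mr
  · rw [if_pos hbig]
    rcases hbig with h0 | hge
    · rcases lt_or_ge mr ((s.length : Int) - 1) with hlt | hge
      · rw [pv_loopA_iff s mr _ ((s.length : Int) - 1) (by omega) rfl]
        intro L' h1 h2
        by_contra hc
        obtain ⟨i, hi0, hin, _, _⟩ := (pv_innerA_iff s L').mp (by simpa using hc)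
        omega
      · have h : ((s.length : Int) - 1 - mr).toNat = 0 := by omega
        rw [h]; rfl
    · have h : ((s.length : Int) - 1 - mr).toNat = 0 := by omega
      rw [h]; rfl
  · push Not at hbig
    obtain ⟨hNne, hmrlt⟩ := hbig
    have hge1 : 1 ≤ (s.length : Int) := by omega
    rw [if_neg (by push Not; exact ⟨hNne, hmrlt⟩)]
    have hiff := pv_loopA_iff s mr (((s.length : Int) - 1 - mr).toNat) ((s.length : Int) - 1) (by omega) rfl
    by_cases hLpos : mr + 1 ≤ 0
    · -- B returns False; A hits at the empty fragment, length 0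
      rw [if_pos hLpos, Bool.eq_false_iff]
      intro htrue
      have := hiff.mp htrue 0 (by omega) (by omega)
      simp [pv_innerA_zero s hge1] at this
    · have hL1 : (1:Int) ≤ mr + 1 := by omega
      rw [if_neg hLpos]
      by_cases hany : (PySem.List.pyRange 0 ((s.length : Int) - (mr + 1)) 1).any (fun index =>
          PySem.Chars.isIn ((PySem.List.slice s (some index) (some (index + (mr + 1)))).reverse) s) = true
      · rw [if_pos hany, Bool.eq_false_iff]
        intro htrue
        have hhit := (pv_alt_any_iff s (mr + 1) hL1).mp hany
        have := hiff.mp htrue (mr + 1) (by omega) (by omega)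
        simp [hhit] at this
      · rw [if_neg hany, hiff]
        intro L' h1 h2
        by_contra hc
        have hc' : pvInnerA s L' = true := by simpa using hc
        have hhit : pvInnerA s (mr + 1) = true := by
          have hd : L' = (mr + 1) + ((L' - (mr + 1)).toNat : Int) := by omega
          exact pv_innerA_descend s (L' - (mr + 1)).toNat (mr + 1) hL1 (by rw [← hd]; exact hc')
        exact hany ((pv_alt_any_iff s (mr + 1) hL1).mpr hhit)

-- ===== VERDICT (by name: the statement is the Claim_ definition above) =====
theorem dyad_motif_repeat_spec : Claim_equal_dyad_motif_repeat := by
  intro dna_motif mr _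
  unfold Spec_dyad_motif_repeat dyad_motif_repeat dyad_motif_repeat_alt
  exact pv_main dna_motif.toList mr
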